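-- pv_equiv track=rewrite | github.com/Embler-autopartes/limpieza-datos-embler | scripts/01_extraer_categorias_v2.py | clasificar_producto
-- ===== SOURCE A (Python) =====
-- def extraer_subcategoria(categoria):
--     if not categoria:
--         return "otros"
--     partes = str(categoria).split(">")
--     if len(partes) >= 3:
--         sub = partes[2].strip().lower()
--     elif len(partes) >= 2:
--         sub = partes[1].strip().lower()
--     else:
--         sub = partes[0].strip().lower()
--     return sub
--
-- def clasificar_producto(categoria, titulo):
--     cat = str(categoria).lower() if categoria else ""
--
--     if "refacciones autos" in cat or "refacciones de auto" in cat: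
--         sub = extraer_subcategoria(categoria)
--         if any(x in sub for x in ["motor", "admisi", "escape", "enfriamiento", "turbo"]):
--             return "refacciones_motor"
--         elif any(x in sub for x in ["suspensi", "direcci", "amortiguad"]):
--             return "refacciones_suspension"
--         elif any(x in sub for x in ["freno", "pastilla", "disco"]):
--             return "refacciones_frenos"
--         elif any(x in sub for x in ["transmisi", "clutch", "embrague"]):
--             return "refacciones_transmision"
--         elif any(x in sub for x in ["electri", "sensor", "encendido", "alternador", "bobina"]):
--             return "refacciones_electrico"
--         elif any(x in sub for x in ["carrocer", "espejo", "puerta", "defensa", "parrilla"]):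
--             return "refacciones_carroceria"
--         elif any(x in sub for x in ["aire acondicionado", "calefacci", "clima"]):
--             return "refacciones_clima"
--         else:
--             return "refacciones_otros"
--     elif "accesorio" in cat and "tuning" not in cat:
--         return "accesorios"
--     elif "tuning" in cat:
--         return "tuning"
--     elif "moto" in cat:
--         return "motos"
--     elif "pesada" in cat or "linea pesada" in cat:
--         return "linea_pesada"
--     elif "herramienta" in cat:
--         return "herramientas"
--     else:
--         return "otros"
-- ===== SOURCE B (Python) =====
-- # Two-stage classification: stage 1 collects ALL labels whose keyword group matches,
-- # stage 2 picks the first label of a separate priority list found among the matches;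
-- # tuning's precedence over accesorios is encoded by that priority order instead of a
-- # negated condition, and rule order no longer decides the winner.
--
-- SUB_GROUPS = [
--     ("refacciones_motor", ["motor", "admisi", "escape", "enfriamiento", "turbo"]),
--     ("refacciones_suspension", ["suspensi", "direcci", "amortiguad"]),
--     ("refacciones_frenos", ["freno", "pastilla", "disco"]),
--     ("refacciones_transmision", ["transmisi", "clutch", "embrague"]),
--     ("refacciones_electrico", ["electri", "sensor", "encendido", "alternador", "bobina"]),
--     ("refacciones_carroceria", ["carrocer", "espejo", "puerta", "defensa", "parrilla"]),
--     ("refacciones_clima", ["aire acondicionado", "calefacci", "clima"]),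
-- ]
-- SUB_PRIORITY = [g[0] for g in SUB_GROUPS]
--
-- CAT_GROUPS = [
--     ("accesorios", ["accesorio"]),
--     ("tuning", ["tuning"]),
--     ("motos", ["moto"]),
--     ("linea_pesada", ["pesada", "linea pesada"]),
--     ("herramientas", ["herramienta"]),
-- ]
-- CAT_PRIORITY = ["tuning", "accesorios", "motos", "linea_pesada", "herramientas"]
--
-- def _classify(groups, priority, text, default):
--     matched = [label for label, kws in groups if any(k in text for k in kws)]
--     for label in priority:
--         if label in matched:
--             return label
--     return default
--
-- def extraer_subcategoria(categoria):
--     if not categoria: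
--         return "otros"
--     partes = str(categoria).split(">")
--     return partes[min(2, len(partes) - 1)].strip().lower()
--
-- def clasificar_producto(categoria, titulo):
--     cat = str(categoria).lower() if categoria else ""
--     if "refacciones autos" in cat or "refacciones de auto" in cat:
--         return _classify(SUB_GROUPS, SUB_PRIORITY, extraer_subcategoria(categoria), "refacciones_otros")
--     return _classify(CAT_GROUPS, CAT_PRIORITY, cat, "otros")
-- ===== Notes on version B (the rewrite author's own statement) =====
-- stated objective: alternative
-- what changed: Replaces both short-circuit if/elif cascades by a two-stage algorithm: first collect every label whose keyword group matches, then select the first label of a separate priority list among the matches; tuning's precedence over accesorios comes from the priority order instead of a negated condition.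
import Mathlib
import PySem

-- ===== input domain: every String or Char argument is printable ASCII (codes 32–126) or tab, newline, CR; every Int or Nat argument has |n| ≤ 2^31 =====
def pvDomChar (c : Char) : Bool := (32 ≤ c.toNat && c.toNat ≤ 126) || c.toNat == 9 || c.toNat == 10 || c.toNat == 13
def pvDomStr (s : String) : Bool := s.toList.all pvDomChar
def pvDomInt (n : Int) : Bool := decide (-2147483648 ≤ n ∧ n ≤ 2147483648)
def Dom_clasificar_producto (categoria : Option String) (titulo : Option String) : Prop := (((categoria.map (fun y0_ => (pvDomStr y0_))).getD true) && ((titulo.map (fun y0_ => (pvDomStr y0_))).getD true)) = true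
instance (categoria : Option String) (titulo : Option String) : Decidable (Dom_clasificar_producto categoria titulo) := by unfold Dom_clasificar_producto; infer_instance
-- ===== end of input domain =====

-- B replaces A's short-circuit if/elif cascades by a two-stage algorithm: collect all
-- matching labels, then select the first label of a separate priority list among them
-- (objective: alternative).

-- ===== PORT A =====
def extraer_subcategoria (categoria : Option String) : String :=
  match categoria with
  | none => "otros"
  | some s =>
    if s == "" then "otros"
    else
      let partes := (PySem.Str.split? s ">").getD []
      if partes.length ≥ 3 then PySem.Str.lower (PySem.Str.strip (partes.getD 2 ""))
      else if partes.length ≥ 2 then PySem.Str.lower (PySem.Str.strip (partes.getD 1 ""))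
      else PySem.Str.lower (PySem.Str.strip (partes.getD 0 ""))

def clasificar_producto (categoria : Option String) (titulo : Option String) : String :=
  let cat : String :=
    match categoria with
    | none => ""
    | some s => if s == "" then "" else PySem.Str.lower s
  if PySem.Str.isIn "refacciones autos" cat || PySem.Str.isIn "refacciones de auto" cat then
    let sub := extraer_subcategoria categoria
    if (["motor", "admisi", "escape", "enfriamiento", "turbo"].any fun x => PySem.Str.isIn x sub) then
      "refacciones_motor"
    else if (["suspensi", "direcci", "amortiguad"].any fun x => PySem.Str.isIn x sub) then
      "refacciones_suspension"
    else if (["freno", "pastilla", "disco"].any fun x => PySem.Str.isIn x sub) then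
      "refacciones_frenos"
    else if (["transmisi", "clutch", "embrague"].any fun x => PySem.Str.isIn x sub) then
      "refacciones_transmision"
    else if (["electri", "sensor", "encendido", "alternador", "bobina"].any fun x => PySem.Str.isIn x sub) then
      "refacciones_electrico"
    else if (["carrocer", "espejo", "puerta", "defensa", "parrilla"].any fun x => PySem.Str.isIn x sub) then
      "refacciones_carroceria"
    else if (["aire acondicionado", "calefacci", "clima"].any fun x => PySem.Str.isIn x sub) then
      "refacciones_clima"
    else
      "refacciones_otros"
  else if PySem.Str.isIn "accesorio" cat && !(PySem.Str.isIn "tuning" cat) then "accesorios"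
  else if PySem.Str.isIn "tuning" cat then "tuning"
  else if PySem.Str.isIn "moto" cat then "motos"
  else if PySem.Str.isIn "pesada" cat || PySem.Str.isIn "linea pesada" cat then "linea_pesada"
  else if PySem.Str.isIn "herramienta" cat then "herramientas"
  else "otros"

-- ===== PORT B =====
def subGroups : List (String × List String) :=
  [ ("refacciones_motor", ["motor", "admisi", "escape", "enfriamiento", "turbo"]),
    ("refacciones_suspension", ["suspensi", "direcci", "amortiguad"]),
    ("refacciones_frenos", ["freno", "pastilla", "disco"]),
    ("refacciones_transmision", ["transmisi", "clutch", "embrague"]),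
    ("refacciones_electrico", ["electri", "sensor", "encendido", "alternador", "bobina"]),
    ("refacciones_carroceria", ["carrocer", "espejo", "puerta", "defensa", "parrilla"]),
    ("refacciones_clima", ["aire acondicionado", "calefacci", "clima"]) ]

def subPriority : List String := subGroups.map (fun g => g.1)

def catGroups : List (String × List String) :=
  [ ("accesorios", ["accesorio"]),
    ("tuning", ["tuning"]),
    ("motos", ["moto"]),
    ("linea_pesada", ["pesada", "linea pesada"]),
    ("herramientas", ["herramienta"]) ]

def catPriority : List String := ["tuning", "accesorios", "motos", "linea_pesada", "herramientas"]

def selectPrio (priority : List String) (matched : List String) (dflt : String) : String :=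
  match priority with
  | [] => dflt
  | l :: rest => if matched.contains l then l else selectPrio rest matched dflt

def pvClassify (groups : List (String × List String)) (priority : List String)
    (text : String) (dflt : String) : String :=
  let matched := groups.filterMap
    (fun g => if g.2.any (fun k => PySem.Str.isIn k text) then some g.1 else none)
  selectPrio priority matched dflt

def extraer_subcategoria_alt (categoria : Option String) : String :=
  match categoria with
  | none => "otros"
  | some s =>
    if s == "" then "otros"
    else
      let partes := (PySem.Str.split? s ">").getD []
      PySem.Str.lower (PySem.Str.strip (partes.getD (min 2 (partes.length - 1)) ""))

def clasificar_producto_alt (categoria : Option String) (titulo : Option String) : String :=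
  let cat : String :=
    match categoria with
    | none => ""
    | some s => if s == "" then "" else PySem.Str.lower s
  if PySem.Str.isIn "refacciones autos" cat || PySem.Str.isIn "refacciones de auto" cat then
    pvClassify subGroups subPriority (extraer_subcategoria_alt categoria) "refacciones_otros"
  else
    pvClassify catGroups catPriority cat "otros"

-- ===== PRECONDITION & SPEC =====
def Spec_clasificar_producto (categoria : Option String) (titulo : Option String) (out : String) : Prop := out = clasificar_producto_alt categoria titulo
instance (categoria : Option String) (titulo : Option String) (out : String) : Decidable (Spec_clasificar_producto categoria titulo out) := by unfold Spec_clasificar_producto; infer_instance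

-- ===== CLAIM (what is proved, stated in full; the proofs are below) =====
def Claim_equal_clasificar_producto : Prop := ∀ (categoria : Option String) (titulo : Option String), Dom_clasificar_producto categoria titulo → Spec_clasificar_producto categoria titulo (clasificar_producto categoria titulo)

-- ===== LEMMAS AND PROOFS =====
theorem extraer_eq (categoria : Option String) :
    extraer_subcategoria categoria = extraer_subcategoria_alt categoria := by
  unfold extraer_subcategoria extraer_subcategoria_alt
  cases categoria with
  | none => rfl
  | some s =>
    by_cases hs : s == ""
    · simp [hs]
    · simp only [hs]
      set partes := (PySem.Str.split? s ">").getD []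
      by_cases h3 : partes.length ≥ 3
      · have : min 2 (partes.length - 1) = 2 := by omega
        simp [h3, this]
      · by_cases h2 : partes.length ≥ 2
        · have : min 2 (partes.length - 1) = 1 := by omega
          simp [h3, h2, this]
        · have : min 2 (partes.length - 1) = 0 := by omega
          simp [h3, h2, this]

theorem inner_eq (sub : String) :
    (if (["motor", "admisi", "escape", "enfriamiento", "turbo"].any fun x => PySem.Str.isIn x sub) then
      "refacciones_motor"
    else if (["suspensi", "direcci", "amortiguad"].any fun x => PySem.Str.isIn x sub) then
      "refacciones_suspension"
    else if (["freno", "pastilla", "disco"].any fun x => PySem.Str.isIn x sub) then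
      "refacciones_frenos"
    else if (["transmisi", "clutch", "embrague"].any fun x => PySem.Str.isIn x sub) then
      "refacciones_transmision"
    else if (["electri", "sensor", "encendido", "alternador", "bobina"].any fun x => PySem.Str.isIn x sub) then
      "refacciones_electrico"
    else if (["carrocer", "espejo", "puerta", "defensa", "parrilla"].any fun x => PySem.Str.isIn x sub) then
      "refacciones_carroceria"
    else if (["aire acondicionado", "calefacci", "clima"].any fun x => PySem.Str.isIn x sub) then
      "refacciones_clima"
    else
      "refacciones_otros") = pvClassify subGroups subPriority sub "refacciones_otros" := by
  unfold pvClassify subGroups subPriority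
  simp only [List.filterMap_cons, List.filterMap_nil]
  generalize (["motor", "admisi", "escape", "enfriamiento", "turbo"].any fun x => PySem.Str.isIn x sub) = b1
  generalize (["suspensi", "direcci", "amortiguad"].any fun x => PySem.Str.isIn x sub) = b2
  generalize (["freno", "pastilla", "disco"].any fun x => PySem.Str.isIn x sub) = b3
  generalize (["transmisi", "clutch", "embrague"].any fun x => PySem.Str.isIn x sub) = b4
  generalize (["electri", "sensor", "encendido", "alternador", "bobina"].any fun x => PySem.Str.isIn x sub) = b5
  generalize (["carrocer", "espejo", "puerta", "defensa", "parrilla"].any fun x => PySem.Str.isIn x sub) = b6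
  generalize (["aire acondicionado", "calefacci", "clima"].any fun x => PySem.Str.isIn x sub) = b7
  revert b1 b2 b3 b4 b5 b6 b7
  decide

theorem outer_eq (cat : String) :
    (if PySem.Str.isIn "accesorio" cat && !(PySem.Str.isIn "tuning" cat) then "accesorios"
     else if PySem.Str.isIn "tuning" cat then "tuning"
     else if PySem.Str.isIn "moto" cat then "motos"
     else if PySem.Str.isIn "pesada" cat || PySem.Str.isIn "linea pesada" cat then "linea_pesada"
     else if PySem.Str.isIn "herramienta" cat then "herramientas"
     else "otros") = pvClassify catGroups catPriority cat "otros" := by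
  unfold pvClassify catGroups catPriority
  simp only [List.filterMap_cons, List.filterMap_nil, List.any_cons, List.any_nil, Bool.or_false]
  generalize PySem.Str.isIn "accesorio" cat = b1
  generalize PySem.Str.isIn "tuning" cat = b2
  generalize PySem.Str.isIn "moto" cat = b3
  generalize PySem.Str.isIn "pesada" cat = b4
  generalize PySem.Str.isIn "linea pesada" cat = b5
  generalize PySem.Str.isIn "herramienta" cat = b6
  revert b1 b2 b3 b4 b5 b6
  decide

-- ===== VERDICT (by name: the statement is the Claim_ definition above) =====
theorem clasificar_producto_spec : Claim_equal_clasificar_producto := by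
  intro categoria titulo _
  unfold Spec_clasificar_producto clasificar_producto clasificar_producto_alt
  simp only [extraer_eq, inner_eq, outer_eq]
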